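-- pv_equiv track=rewrite | github.com/deverac/hpircomm | src/kprotocol.py | construct_payloads
-- ===== SOURCE A (Python) =====
-- def ctl(i):
--   return i ^ 64
--
-- def construct_payloads(strbuf, prefix, max_payload_len):
--     payloads = []
--     payload = []
--     for ch in strbuf:
--         to_add = []
--         n = ord(ch) & 0x7F
--
--         if chr(n) == prefix:
--             to_add.append(prefix)
--             to_add.append(ch)
--         elif n < 32 or n == 127:
--             to_add.append(prefix)
--             to_add.append(chr(ctl(ord(ch))))
--         else:
--             to_add.append(ch)
--
--         if len(payload) + len(to_add) > max_payload_len: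
--             payloads.append(payload)
--             payload = []
--         payload.extend(to_add)
--
--     if payload:
--         payloads.append(payload)
--     return payloads
-- ===== SOURCE B (Python) =====
-- def construct_payloads(strbuf, prefix, max_payload_len):
--     # Pass 1: map each character to its escaped token group.
--     def encode(ch):
--         n = ord(ch) & 0x7F
--         if chr(n) == prefix:
--             return [prefix, ch]
--         if n < 32 or n == 127:
--             return [prefix, chr(ord(ch) ^ 64)]
--         return [ch]
--
--     groups = [encode(ch) for ch in strbuf]
--     # Pass 2: greedy packing of the groups into chunks of at most
--     # max_payload_len tokens (an oversized group forms its own chunk).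
--     out = []
--     i = 0
--     while i < len(groups):
--         chunk = list(groups[i])
--         i += 1
--         while i < len(groups) and len(chunk) + len(groups[i]) <= max_payload_len:
--             chunk.extend(groups[i])
--             i += 1
--         out.append(chunk)
--     return out
-- ===== Notes on version B (the rewrite author's own statement) =====
-- stated objective: alternative
-- what changed: A interleaves escaping and chunking in one loop over characters with a mutable payload accumulator and a flush-before-extend rule; B first maps every character to its escaped token group and then packs the group list into chunks by a recursive greedy splitter (inner take-while, outer recursion), so encoding and chunking are separate passes.
-- intended difference: On nonempty inputs whose very first escaped token group is already longer than max_payload_len (any nonempty strbuf with max_payload_len <= 0, or an escaped/prefix first character with max_payload_len = 1), A's flush-before-extend rule emits a spurious empty payload at the front of the result; B emits only the nonempty greedy chunks, which is the intended packing since an empty payload carries no data. — e.g. on construct_payloads("\n", "#", 1): A returns [[], ["#", "J"]], B returns [["#", "J"]]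
import Mathlib
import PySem

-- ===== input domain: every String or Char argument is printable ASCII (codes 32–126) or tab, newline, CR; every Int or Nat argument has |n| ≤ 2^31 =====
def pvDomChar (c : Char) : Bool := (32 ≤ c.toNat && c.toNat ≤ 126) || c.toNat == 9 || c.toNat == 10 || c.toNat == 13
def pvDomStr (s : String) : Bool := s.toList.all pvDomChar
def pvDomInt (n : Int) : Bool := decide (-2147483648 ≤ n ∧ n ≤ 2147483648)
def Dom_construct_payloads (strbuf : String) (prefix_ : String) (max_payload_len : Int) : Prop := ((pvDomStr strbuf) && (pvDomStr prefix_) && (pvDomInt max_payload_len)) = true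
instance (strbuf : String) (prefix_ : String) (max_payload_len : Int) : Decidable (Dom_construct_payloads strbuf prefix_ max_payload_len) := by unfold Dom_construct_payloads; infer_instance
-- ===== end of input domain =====

-- B separates encoding from chunking (two passes, recursive greedy splitter); on inputs whose first
-- escaped group exceeds max_payload_len, A emits a spurious leading empty payload and B does not (D_ below).

-- ===== PORT A =====
def pvCtl (i : Nat) : Nat := i ^^^ 64

-- one step of A's for-loop over (payloads, payload)
def pvStepA (prefix_ : String) (max_payload_len : Int)
    (st : List (List String) × List String) (ch : Char) : List (List String) × List String :=
  let n := ch.toNat &&& 0x7F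
  let to_add : List String :=
    if String.ofList [Char.ofNat n] == prefix_ then [prefix_, String.ofList [ch]]
    else if n < 32 || n == 127 then [prefix_, String.ofList [Char.ofNat (pvCtl ch.toNat)]]
    else [String.ofList [ch]]
  let st' :=
    if (st.2.length : Int) + (to_add.length : Int) > max_payload_len then (st.1 ++ [st.2], ([] : List String))
    else st
  (st'.1, st'.2 ++ to_add)

-- A's final 'if payload: payloads.append(payload)'
def pvFinA (st : List (List String) × List String) : List (List String) :=
  if st.2 ≠ [] then st.1 ++ [st.2] else st.1

def construct_payloads (strbuf : String) (prefix_ : String) (max_payload_len : Int) : List (List String) :=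
  pvFinA (strbuf.toList.foldl (pvStepA prefix_ max_payload_len) ([], []))

-- ===== PORT B =====
-- encode one character (B's pass 1)
def pvEncode (prefix_ : String) (ch : Char) : List String :=
  let n := ch.toNat &&& 0x7F
  if String.ofList [Char.ofNat n] == prefix_ then [prefix_, String.ofList [ch]]
  else if n < 32 || n == 127 then [prefix_, String.ofList [Char.ofNat (ch.toNat ^^^ 64)]]
  else [String.ofList [ch]]

-- B's inner while: extend `chunk` with groups while they fit
def pvTake (max_payload_len : Int) (chunk : List String) :
    List (List String) → List String × List (List String)
  | [] => (chunk, [])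
  | g :: rest =>
    if (chunk.length : Int) + (g.length : Int) ≤ max_payload_len then
      pvTake max_payload_len (chunk ++ g) rest
    else (chunk, g :: rest)

theorem pvTake_rest_le (max_payload_len : Int) (chunk : List String)
    (gs : List (List String)) : (pvTake max_payload_len chunk gs).2.length ≤ gs.length := by
  induction gs generalizing chunk with
  | nil => simp [pvTake]
  | cons g rest ih =>
    simp only [pvTake]
    split
    · exact le_trans (ih _) (Nat.le_succ _)
    · simp

-- B's outer while: split the groups into greedy chunks
def pvPack (max_payload_len : Int) : List (List String) → List (List String)
  | [] => []
  | g :: rest =>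
    let pr := pvTake max_payload_len g rest
    pr.1 :: pvPack max_payload_len pr.2
termination_by gs => gs.length
decreasing_by
  exact Nat.lt_succ_of_le (pvTake_rest_le _ _ _)

def construct_payloads_alt (strbuf : String) (prefix_ : String) (max_payload_len : Int) : List (List String) :=
  pvPack max_payload_len (strbuf.toList.map (pvEncode prefix_))

-- ===== PRECONDITION & SPEC =====
-- On nonempty inputs whose first escaped token group is already longer than max_payload_len
-- (any nonempty strbuf with max_payload_len ≤ 0, or an escaped/prefix first character with
-- max_payload_len = 1), A's flush-before-extend rule emits a spurious empty payload at the
-- front of the result; B emits only the nonempty greedy chunks, the intended packing.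
def D_construct_payloads (strbuf : String) (prefix_ : String) (max_payload_len : Int) : Prop :=
  strbuf.toList ≠ [] ∧
    (if String.ofList [Char.ofNat ((strbuf.toList.headD ' ').toNat &&& 0x7F)] == prefix_ ∨
        (strbuf.toList.headD ' ').toNat &&& 0x7F < 32 ∨ (strbuf.toList.headD ' ').toNat &&& 0x7F = 127
     then (2 : Int) else 1) > max_payload_len
instance (strbuf : String) (prefix_ : String) (max_payload_len : Int) : Decidable (D_construct_payloads strbuf prefix_ max_payload_len) := by unfold D_construct_payloads; infer_instance

def Spec_construct_payloads (strbuf : String) (prefix_ : String) (max_payload_len : Int) (out : List (List String)) : Prop := ¬ D_construct_payloads strbuf prefix_ max_payload_len → out = construct_payloads_alt strbuf prefix_ max_payload_len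
instance (strbuf : String) (prefix_ : String) (max_payload_len : Int) (out : List (List String)) : Decidable (Spec_construct_payloads strbuf prefix_ max_payload_len out) := by unfold Spec_construct_payloads; infer_instance

def pvDiffWitness_construct_payloads : String × String × Int := ("\n", "#", 1)
def pvDiffWitnessOut_construct_payloads : (List (List String)) × (List (List String)) :=
  ([[], ["#", "J"]], [["#", "J"]])

-- ===== CLAIM (what is proved, stated in full; the proofs are below) =====
def Claim_unchanged_construct_payloads : Prop := ∀ (strbuf : String) (prefix_ : String) (max_payload_len : Int), Dom_construct_payloads strbuf prefix_ max_payload_len → Spec_construct_payloads strbuf prefix_ max_payload_len (construct_payloads strbuf prefix_ max_payload_len)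
def Claim_changed_construct_payloads : Prop := Dom_construct_payloads (pvDiffWitness_construct_payloads.1) (pvDiffWitness_construct_payloads.2.1) (pvDiffWitness_construct_payloads.2.2) ∧ D_construct_payloads (pvDiffWitness_construct_payloads.1) (pvDiffWitness_construct_payloads.2.1) (pvDiffWitness_construct_payloads.2.2) ∧ construct_payloads (pvDiffWitness_construct_payloads.1) (pvDiffWitness_construct_payloads.2.1) (pvDiffWitness_construct_payloads.2.2) = pvDiffWitnessOut_construct_payloads.1 ∧ construct_payloads_alt (pvDiffWitness_construct_payloads.1) (pvDiffWitness_construct_payloads.2.1) (pvDiffWitness_construct_payloads.2.2) = pvDiffWitnessOut_construct_payloads.2 ∧ pvDiffWitnessOut_construct_payloads.1 ≠ pvDiffWitnessOut_construct_payloads.2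
def Claim_exact_construct_payloads : Prop := ∀ (strbuf : String) (prefix_ : String) (max_payload_len : Int), Dom_construct_payloads strbuf prefix_ max_payload_len → D_construct_payloads strbuf prefix_ max_payload_len → construct_payloads strbuf prefix_ max_payload_len ≠ construct_payloads_alt strbuf prefix_ max_payload_len

-- ===== LEMMAS AND PROOFS =====

-- A's step, rephrased over the encoded group of the character
def pvStepG (max_payload_len : Int) (st : List (List String) × List String)
    (g : List String) : List (List String) × List String :=
  let st' :=
    if (st.2.length : Int) + (g.length : Int) > max_payload_len then (st.1 ++ [st.2], ([] : List String))
    else st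
  (st'.1, st'.2 ++ g)

theorem stepA_eq_stepG (prefix_ : String) (max_payload_len : Int)
    (st : List (List String) × List String) (ch : Char) :
    pvStepA prefix_ max_payload_len st ch = pvStepG max_payload_len st (pvEncode prefix_ ch) := rfl

theorem fold_map (prefix_ : String) (max_payload_len : Int) (l : List Char)
    (st : List (List String) × List String) :
    l.foldl (pvStepA prefix_ max_payload_len) st =
      (l.map (pvEncode prefix_)).foldl (pvStepG max_payload_len) st := by
  induction l generalizing st with
  | nil => rfl
  | cons c cs ih => simp [stepA_eq_stepG, ih]

theorem pvEncode_ne_nil (prefix_ : String) (ch : Char) : pvEncode prefix_ ch ≠ [] := by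
  by_cases h1 : (String.ofList [Char.ofNat (ch.toNat &&& 0x7F)] == prefix_) = true <;>
    by_cases h2 : (decide (ch.toNat &&& 0x7F < 32) || (ch.toNat &&& 0x7F == 127)) = true <;>
      simp [pvEncode, h1, h2]

-- the first encoded group's length, as D_'s inline condition states it
theorem encode_length (prefix_ : String) (c : Char) :
    ((pvEncode prefix_ c).length : Int) =
      if String.ofList [Char.ofNat (c.toNat &&& 0x7F)] == prefix_ ∨
          c.toNat &&& 0x7F < 32 ∨ c.toNat &&& 0x7F = 127 then (2 : Int) else 1 := by
  simp only [pvEncode]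
  by_cases h1 : (String.ofList [Char.ofNat (c.toNat &&& 0x7F)] == prefix_) = true
  · rw [if_pos h1, if_pos (Or.inl h1)]; simp
  · rw [if_neg h1]
    by_cases h2 : (decide (c.toNat &&& 0x7F < 32) || (c.toNat &&& 0x7F == 127)) = true
    · rw [if_pos h2, if_pos (Or.inr (by simpa using h2))]; simp
    · rw [if_neg h2, if_neg ?_]
      · simp
      · intro hc
        rcases hc with h | h
        · exact h1 h
        · exact absurd h (by simpa using h2)

-- D_'s inline length condition is exactly 'the first encoded group is oversized'
theorem D_iff_first_big (strbuf : String) (prefix_ : String) (max_payload_len : Int)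
    (c : Char) (cs : List Char) (hb : strbuf.toList = c :: cs) :
    D_construct_payloads strbuf prefix_ max_payload_len ↔
      ((pvEncode prefix_ c).length : Int) > max_payload_len := by
  unfold D_construct_payloads
  rw [hb, encode_length]
  simp

-- pvTake only grows its chunk
theorem pvTake_fst_ne_nil (max_payload_len : Int) (chunk : List String)
    (hc : chunk ≠ []) (gs : List (List String)) :
    (pvTake max_payload_len chunk gs).1 ≠ [] := by
  induction gs generalizing chunk with
  | nil => simpa [pvTake]
  | cons g rest ih =>
    simp only [pvTake]
    split
    · exact ih _ (by simp [hc])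
    · simpa

-- Main invariant: with a nonempty current payload, A's remaining loop produces
-- exactly the current greedy chunk followed by the greedy packing of the rest.
theorem loop_invariant (max_payload_len : Int) (gs : List (List String))
    (hgs : ∀ g ∈ gs, g ≠ []) (ps : List (List String)) (p : List String) (hp : p ≠ []) :
    pvFinA (gs.foldl (pvStepG max_payload_len) (ps, p)) =
      ps ++ ((pvTake max_payload_len p gs).1 :: pvPack max_payload_len (pvTake max_payload_len p gs).2) := by
  induction gs generalizing ps p with
  | nil => simp [pvFinA, pvTake, pvPack, hp]
  | cons g rest ih =>
    have hg : g ≠ [] := hgs g (by simp)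
    have hrest : ∀ x ∈ rest, x ≠ [] := fun x hx => hgs x (List.mem_cons_of_mem _ hx)
    by_cases hfit : (p.length : Int) + (g.length : Int) ≤ max_payload_len
    · have hstep : pvStepG max_payload_len (ps, p) g = (ps, p ++ g) := by
        simp [pvStepG, not_lt.mpr hfit]
      rw [List.foldl_cons, hstep, ih hrest ps (p ++ g) (by simp [hp])]
      simp [pvTake, hfit]
    · have hstep : pvStepG max_payload_len (ps, p) g = (ps ++ [p], g) := by
        simp [pvStepG, lt_of_not_ge hfit]
      rw [List.foldl_cons, hstep, ih hrest (ps ++ [p]) g hg]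
      have : pvTake max_payload_len p (g :: rest) = (p, g :: rest) := by
        simp [pvTake, hfit]
      rw [this]
      simp [pvPack]

-- A's full result: leading [] iff the first group is oversized, then B's greedy packing
theorem A_characterised (strbuf : String) (prefix_ : String) (max_payload_len : Int)
    (c : Char) (cs : List Char) (hb : strbuf.toList = c :: cs) :
    construct_payloads strbuf prefix_ max_payload_len =
      (if ((pvEncode prefix_ c).length : Int) > max_payload_len then [([] : List String)] else []) ++
        pvPack max_payload_len (strbuf.toList.map (pvEncode prefix_)) := by
  unfold construct_payloads
  rw [fold_map, hb]
  have hne : ∀ g ∈ cs.map (pvEncode prefix_), g ≠ [] := by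
    intro g hg
    obtain ⟨x, _, rfl⟩ := List.mem_map.mp hg
    exact pvEncode_ne_nil _ _
  have henc : pvEncode prefix_ c ≠ [] := pvEncode_ne_nil _ _
  simp only [List.map_cons, List.foldl_cons]
  by_cases hbig : ((pvEncode prefix_ c).length : Int) > max_payload_len
  · have hstep : pvStepG max_payload_len ([], []) (pvEncode prefix_ c) =
        ([[]], pvEncode prefix_ c) := by
      simp [pvStepG, hbig]
    rw [hstep, loop_invariant max_payload_len _ hne [[]] _ henc]
    simp [hbig, pvPack]
  · have hstep : pvStepG max_payload_len ([], []) (pvEncode prefix_ c) =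
        ([], pvEncode prefix_ c) := by
      simp [pvStepG, hbig]
    rw [hstep, loop_invariant max_payload_len _ hne [] _ henc]
    simp [hbig, pvPack]

-- ===== VERDICT (by name: the statements are the Claim_ definitions above) =====
theorem construct_payloads_spec : Claim_unchanged_construct_payloads := by
  intro strbuf prefix_ max_payload_len _hdom hD
  unfold construct_payloads_alt
  cases hb : strbuf.toList with
  | nil =>
    unfold construct_payloads
    rw [hb]
    simp [pvFinA, pvPack]
  | cons c cs =>
    rw [A_characterised strbuf prefix_ max_payload_len c cs hb]
    rw [D_iff_first_big strbuf prefix_ max_payload_len c cs hb] at hD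
    rw [hb]
    simp [hD]

theorem construct_payloads_changed : Claim_changed_construct_payloads := by
  unfold Claim_changed_construct_payloads
  refine ⟨by decide, by decide, by decide, ?_, by decide⟩
  show construct_payloads_alt "\n" "#" 1 = [["#", "J"]]
  unfold construct_payloads_alt
  rw [show "\n".toList.map (pvEncode "#") = [["#", "J"]] from by decide]
  simp only [pvPack]
  rw [show pvTake 1 ["#", "J"] [] = (["#", "J"], []) from by decide]
  simp [pvPack]

theorem construct_payloads_tight : Claim_exact_construct_payloads := by
  intro strbuf prefix_ max_payload_len _hdom hD
  cases hb : strbuf.toList with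
  | nil => exact absurd hb hD.1
  | cons c cs =>
    rw [D_iff_first_big strbuf prefix_ max_payload_len c cs hb] at hD
    rw [A_characterised strbuf prefix_ max_payload_len c cs hb]
    unfold construct_payloads_alt
    rw [hb, List.map_cons]
    simp only [hD, if_pos, List.cons_append, List.nil_append, pvPack]
    intro h
    injection h with h1 _
    exact pvTake_fst_ne_nil max_payload_len _ (pvEncode_ne_nil prefix_ c) _ h1.symm
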